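-- pv_equiv track=rewrite | github.com/cresqnt-sys/FishScope-Macro | main.py | clean_ocr_text
-- ===== SOURCE A (Python) =====
-- def clean_ocr_text(text):
--     """Clean OCR text by replacing common misread characters"""
--     text = text.lower()
--     replacements = {
--         '0': 'o',
--         '1': 'l',
--         '2': 'z',
--         '3': 'e',
--         '4': 'a',
--         '5': 's',
--         '6': 'g',
--         '7': 't',
--         '8': 'b',
--         '9': 'q',
--     }
--     for wrong, right in replacements.items():
--         text = text.replace(wrong, right)
--     return text
-- ===== SOURCE B (Python) =====
-- def clean_ocr_text(text):
--     """Clean OCR text by replacing common misread characters"""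
--     letters = "olzeasgtbq"
--     out = []
--     for c in text.lower():
--         if '0' <= c <= '9':
--             out.append(letters[ord(c) - 48])
--         else:
--             out.append(c)
--     return ''.join(out)
-- ===== Notes on version B (the rewrite author's own statement) =====
-- stated objective: alternative
-- what changed: Replaces ten sequential full-string .replace() scans driven by a dict with a single accumulator loop over the lowercased characters that detects digits by range comparison and maps them by arithmetic indexing into a lookup string.
import Mathlib
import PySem

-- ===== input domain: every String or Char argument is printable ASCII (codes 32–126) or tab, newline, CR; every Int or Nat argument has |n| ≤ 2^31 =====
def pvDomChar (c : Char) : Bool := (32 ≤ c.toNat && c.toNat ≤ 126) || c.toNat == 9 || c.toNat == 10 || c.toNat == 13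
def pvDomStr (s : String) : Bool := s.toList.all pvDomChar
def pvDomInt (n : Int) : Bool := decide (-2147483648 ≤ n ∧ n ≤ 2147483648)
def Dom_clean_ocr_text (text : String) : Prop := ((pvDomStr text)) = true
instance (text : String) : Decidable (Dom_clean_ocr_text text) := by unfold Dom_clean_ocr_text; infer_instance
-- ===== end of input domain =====

-- B replaces the ten dict-driven full-string replace() scans with one accumulator loop
-- over the lowercased characters, mapping digits by arithmetic indexing into a lookup
-- string (alternative single-pass algorithm; same mapping).

-- ===== PORT A =====
-- the replacements dict of Source A
def pvRepl : PySem.Dict Char Char :=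
  PySem.Dict.ofList [('0','o'),('1','l'),('2','z'),('3','e'),('4','a'),('5','s'),('6','g'),('7','t'),('8','b'),('9','q')]

def clean_ocr_text (text : String) : String :=
  let text := PySem.Str.lower text
  pvRepl.items.foldl
    (fun t p => PySem.Str.replace t (String.ofList [p.1]) (String.ofList [p.2])) text

-- ===== PORT B =====
-- the "letters" lookup string of Source B; letters[ord(c) - 48] is in range whenever
-- '0' <= c <= '9', so the .getD default is never used there (exact port of Source B's indexing)
def pvLetters : List Char := "olzeasgtbq".toList

def clean_ocr_text_alt (text : String) : String :=
  let out := (PySem.Str.lower text).toList.foldl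
    (fun out c =>
      if '0' ≤ c ∧ c ≤ '9' then
        out ++ [(PySem.List.pyGet? pvLetters ((c.toNat : Int) - 48)).getD c]
      else
        out ++ [c]) []
  String.ofList out

-- ===== PRECONDITION & SPEC =====
def Spec_clean_ocr_text (text : String) (out : String) : Prop := out = clean_ocr_text_alt text
instance (text : String) (out : String) : Decidable (Spec_clean_ocr_text text out) := by unfold Spec_clean_ocr_text; infer_instance

-- ===== CLAIM (what is proved, stated in full; the proofs are below) =====
def Claim_equal_clean_ocr_text : Prop := ∀ (text : String), Dom_clean_ocr_text text → Spec_clean_ocr_text text (clean_ocr_text text)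

-- ===== LEMMAS AND PROOFS =====

-- single-character substitution applied by one replacement pair
def pvStep (p : Char × Char) (c : Char) : Char := if c == p.1 then p.2 else c

-- B's per-character mapping
def pvFix (c : Char) : Char :=
  if '0' ≤ c ∧ c ≤ '9' then
    (PySem.List.pyGet? pvLetters ((c.toNat : Int) - 48)).getD c
  else c

theorem replace_go_single (w r : Char) :
    ∀ (fuel : Nat) (l acc : List Char), l.length ≤ fuel →
      PySem.Chars.replace.go [w] [r] fuel l acc
        = acc.reverse ++ l.map (fun c => if c == w then r else c) := by
  intro fuel
  induction fuel with
  | zero =>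
    intro l acc h
    have : l = [] := List.length_eq_zero_iff.mp (Nat.le_zero.mp h)
    subst this
    simp [PySem.Chars.replace.go]
  | succ n ih =>
    intro l acc h
    cases l with
    | nil => simp [PySem.Chars.replace.go]
    | cons c t =>
      simp only [PySem.Chars.replace.go]
      have ht : t.length ≤ n := by simpa using Nat.succ_le_succ_iff.mp h
      by_cases hc : c = w
      · subst hc
        have hpre : List.isPrefixOf [c] (c :: t) = true := by
          simp [List.isPrefixOf]
        rw [if_pos hpre]
        rw [show List.drop [c].length (c :: t) = t by simp]
        rw [ih t ([r].reverse ++ acc) ht]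
        simp
      · have hpre : List.isPrefixOf [w] (c :: t) = false := by
          simp [List.isPrefixOf]
          intro hh
          exact absurd hh.symm hc
        rw [if_neg (by simp [hpre])]
        rw [ih t (c :: acc) ht]
        simp [hc]

theorem replace_single (w r : Char) (cs : List Char) :
    PySem.Chars.replace cs [w] [r] = cs.map fun c => pvStep (w, r) c := by
  rw [PySem.Chars.replace]
  rw [if_neg (by simp)]
  exact replace_go_single w r cs.length cs [] le_rfl

-- a fold of maps is the map of the folded (per-element) function
theorem foldl_map_eq_map_foldl (ps : List (Char × Char)) :
    ∀ (l : List Char),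
      ps.foldl (fun t p => t.map (fun c => pvStep p c)) l
        = l.map (fun c => ps.foldl (fun x p => pvStep p x) c) := by
  induction ps with
  | nil => intro l; simp
  | cons p rest ih =>
    intro l
    simp only [List.foldl_cons, ih, List.map_map]
    rfl

-- a character lies in '0'..'9' exactly when it is one of the ten digit literals
theorem digit_cases (c : Char) (h : '0' ≤ c ∧ c ≤ '9') :
    c = '0' ∨ c = '1' ∨ c = '2' ∨ c = '3' ∨ c = '4' ∨
    c = '5' ∨ c = '6' ∨ c = '7' ∨ c = '8' ∨ c = '9' := by
  obtain ⟨h1, h2⟩ := h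
  have l1 : (48 : Nat) ≤ c.toNat := h1
  have l2 : c.toNat ≤ 57 := h2
  have hval : c = Char.ofNat c.toNat := by
    rw [Char.ofNat_toNat]
  interval_cases hn : c.toNat <;> simp_all

-- per character: A's ten sequential substitutions agree with B's indexed lookup
theorem perchar (c : Char) :
    (pvRepl.items.foldl (fun x p => pvStep p x) c) = pvFix c := by
  by_cases h : '0' ≤ c ∧ c ≤ '9'
  · rcases digit_cases c h with h|h|h|h|h|h|h|h|h|h <;> subst h <;> decide
  · have hne : ∀ d : Char, '0' ≤ d → d ≤ '9' → c ≠ d := by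
      intro d hd1 hd2 he; exact h (he ▸ ⟨hd1, hd2⟩)
    simp only [show pvRepl.items = [('0','o'),('1','l'),('2','z'),('3','e'),('4','a'),('5','s'),('6','g'),('7','t'),('8','b'),('9','q')] from rfl,
      List.foldl_cons, List.foldl_nil, pvStep]
    simp only [beq_iff_eq,
      if_neg (hne '0' (by decide) (by decide)), if_neg (hne '1' (by decide) (by decide)),
      if_neg (hne '2' (by decide) (by decide)), if_neg (hne '3' (by decide) (by decide)),
      if_neg (hne '4' (by decide) (by decide)), if_neg (hne '5' (by decide) (by decide)),
      if_neg (hne '6' (by decide) (by decide)), if_neg (hne '7' (by decide) (by decide)),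
      if_neg (hne '8' (by decide) (by decide)), if_neg (hne '9' (by decide) (by decide))]
    simp [pvFix, h]

-- B's accumulator loop is the map of pvFix
theorem alt_foldl_eq_map (l : List Char) :
    (l.foldl (fun out c =>
      if '0' ≤ c ∧ c ≤ '9' then
        out ++ [(PySem.List.pyGet? pvLetters ((c.toNat : Int) - 48)).getD c]
      else out ++ [c]) []) = l.map pvFix := by
  have key : ∀ (l acc : List Char),
      (l.foldl (fun out c =>
        if '0' ≤ c ∧ c ≤ '9' then
          out ++ [(PySem.List.pyGet? pvLetters ((c.toNat : Int) - 48)).getD c]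
        else out ++ [c]) acc) = acc ++ l.map pvFix := by
    intro l
    induction l with
    | nil => intro acc; simp
    | cons c t ih =>
      intro acc
      simp only [List.foldl_cons, List.map_cons, ih]
      by_cases h : '0' ≤ c ∧ c ≤ '9' <;> simp [h, pvFix]
  simpa using key _ []

-- ===== VERDICT (by name: the statement is the Claim_ definition above) =====
theorem clean_ocr_text_spec : Claim_equal_clean_ocr_text := by
  intro text _
  unfold Spec_clean_ocr_text clean_ocr_text clean_ocr_text_alt
  apply String.toList_inj.mp
  have hstep : ∀ (t : String) (p : Char × Char),
      (PySem.Str.replace t (String.ofList [p.1]) (String.ofList [p.2])).toList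
        = t.toList.map (fun c => pvStep p c) := by
    intro t p
    rw [PySem.Str.toList_replace]
    simp only [String.toList_ofList]
    exact replace_single p.1 p.2 t.toList
  have key : ∀ (ps : List (Char × Char)) (t : String),
      (ps.foldl (fun t p => PySem.Str.replace t (String.ofList [p.1]) (String.ofList [p.2])) t).toList
        = ps.foldl (fun l p => l.map (fun c => pvStep p c)) t.toList := by
    intro ps
    induction ps with
    | nil => intro t; rfl
    | cons p rest ih =>
      intro t
      simp only [List.foldl_cons, ih, hstep]
  rw [key, foldl_map_eq_map_foldl]
  simp only [String.toList_ofList, alt_foldl_eq_map]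
  exact List.map_congr_left (fun c _ => perchar c)
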